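-- pv_equiv track=rewrite | github.com/kerncl/leetcode | python/codility/EquiLeader.py | solution
-- ===== SOURCE A (Python) =====
-- from collections import Counter
--
-- def get_leader_from_counter(counter:Counter):
--     counter_list = counter.most_common(2)   # return format (value, count)
--     if len(counter_list) < 2:
--         return counter_list[0][0]
--     if counter_list[0][1] == counter_list[1][1]:
--         # both have same count
--         return None
--     return counter_list[0][0]
--
-- def solution(a):
--     count = 0
--     for i in range(1, len(a)):
--         left = a[:i]
--         right = a[i:]
--         lc, rc = Counter(left), Counter(right)
--         if get_leader_from_counter(lc) == get_leader_from_counter(rc):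
--             count+=1
--     return count
-- ===== SOURCE B (Python) =====
-- def _unique_mode(cnt):
--     # unique most-frequent key, or None on a tie for the top count; zero counts are skipped
--     best = None
--     bestc = 0
--     tie = False
--     for v, c in cnt.items():
--         if c > bestc:
--             best, bestc, tie = v, c, False
--         elif c == bestc:
--             tie = True
--     return None if tie else best
--
-- def solution(a):
--     right = {}
--     for x in a:
--         right[x] = right.get(x, 0) + 1
--     left = {}
--     count = 0
--     for x in a[:-1]:
--         left[x] = left.get(x, 0) + 1
--         right[x] = right[x] - 1
--         if _unique_mode(left) == _unique_mode(right):
--             count += 1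
--     return count
-- ===== Notes on version B (the rewrite author's own statement) =====
-- stated objective: faster
-- what changed: A re-slices, re-counts and re-sorts both halves for every split point; B builds one frequency dict per side, updates both incrementally while sweeping the split left to right, and finds the unique mode by a single linear scan of the dict instead of sorting.
import Mathlib
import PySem

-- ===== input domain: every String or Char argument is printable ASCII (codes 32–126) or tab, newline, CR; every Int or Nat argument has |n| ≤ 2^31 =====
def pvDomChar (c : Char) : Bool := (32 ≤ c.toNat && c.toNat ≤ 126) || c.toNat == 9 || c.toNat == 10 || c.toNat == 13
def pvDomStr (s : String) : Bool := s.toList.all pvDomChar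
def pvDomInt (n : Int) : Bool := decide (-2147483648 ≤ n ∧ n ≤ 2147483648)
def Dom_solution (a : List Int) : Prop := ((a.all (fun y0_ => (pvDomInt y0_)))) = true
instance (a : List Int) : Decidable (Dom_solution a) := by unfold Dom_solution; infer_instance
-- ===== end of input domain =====

-- B replaces A's per-split slicing/re-counting/sorting by two incrementally maintained
-- frequency dictionaries and a linear unique-mode scan (measurably faster).


-- ===== PORT A =====
-- Counter(xs) is PySem.Dict.counter; counter.most_common(2) is
-- sorted(counter.items(), key=itemgetter(1), reverse=True)[:2] (CPython's documented equivalent).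
def getLeaderA (c : PySem.Dict Int Int) : Option Int :=
  let counterList := (PySem.List.sorted c.items (fun p => p.2) true).take 2
  if counterList.length < 2 then
    match counterList with
    | [] => none          -- Python raises IndexError on an empty counter; unreachable from `solution`
    | p :: _ => some p.1
  else
    match counterList with
    | p :: q :: _ => if p.2 = q.2 then none else some p.1
    | _ => none           -- unreachable: length ≥ 2

def solution (a : List Int) : Int :=
  (PySem.List.pyRange 1 (a.length : Int) 1).foldl (fun count i =>
    let left := PySem.List.slice a none (some i)
    let right := PySem.List.slice a (some i) none
    let lc := PySem.Dict.counter left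
    let rc := PySem.Dict.counter right
    if getLeaderA lc = getLeaderA rc then count + 1 else count) 0

-- ===== PORT B =====
def uniqueModeB (cnt : PySem.Dict Int Int) : Option Int :=
  let st := cnt.items.foldl (fun (st : Option Int × Int × Bool) p =>
      if p.2 > st.2.1 then (some p.1, p.2, false)
      else if p.2 = st.2.1 then (st.1, st.2.1, true)
      else st) (none, 0, false)
  if st.2.2 then none else st.1

def solution_alt (a : List Int) : Int :=
  let right0 := a.foldl (fun d x => d.insert x (d.getD x 0 + 1)) PySem.Dict.empty
  let st := (PySem.List.slice a none (some (-1))).foldl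
      (fun (st : PySem.Dict Int Int × PySem.Dict Int Int × Int) x =>
        let left := st.1.insert x (st.1.getD x 0 + 1)
        -- right[x] = right[x] - 1 : x is always a present key here, so getD's default is never used
        let right := st.2.1.insert x (st.2.1.getD x 0 - 1)
        let count := if uniqueModeB left = uniqueModeB right then st.2.2 + 1 else st.2.2
        (left, right, count))
      (PySem.Dict.empty, right0, 0)
  st.2.2

-- ===== PRECONDITION & SPEC =====
def Spec_solution (a : List Int) (out : Int) : Prop := out = solution_alt a
instance (a : List Int) (out : Int) : Decidable (Spec_solution a out) := by unfold Spec_solution; infer_instance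

-- ===== CLAIM (what is proved, stated in full; the proofs are below) =====
def Claim_equal_solution : Prop := ∀ (a : List Int), Dom_solution a → Spec_solution a (solution a)

-- ===== LEMMAS AND PROOFS =====

def topM (ps : List (Int × Int)) : Int := ps.foldl (fun acc p => max acc p.2) 0

def mstep (st : Option Int × Int × Bool) (p : Int × Int) : Option Int × Int × Bool :=
  if p.2 > st.2.1 then (some p.1, p.2, false)
  else if p.2 = st.2.1 then (st.1, st.2.1, true)
  else st

lemma topM_nonneg (ps : List (Int × Int)) : 0 ≤ topM ps := by
  have := PySem.List.le_foldl_max_int ps (fun p => p.2) 0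
  exact this.1

lemma le_topM (ps : List (Int × Int)) : ∀ p ∈ ps, p.2 ≤ topM ps := by
  have := PySem.List.le_foldl_max_int ps (fun p => p.2) 0
  exact fun p hp => this.2 p hp

lemma topM_append (ps : List (Int × Int)) (q : Int × Int) :
    topM (ps ++ [q]) = max (topM ps) q.2 := by
  simp [topM, List.foldl_append]

lemma topM_mem (ps : List (Int × Int)) (h : topM ps ≠ 0) : ∃ p ∈ ps, p.2 = topM ps := by
  have : topM ps = (ps.map (·.2)).foldl max 0 := by simp [topM, List.foldl_map]
  rcases PySem.List.foldl_max_mem (ps.map (·.2)) 0 with h1 | h1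
  · exact absurd (this.trans h1) h
  · rw [this]; rcases List.mem_map.mp h1 with ⟨p, hp, hpe⟩; exact ⟨p, hp, hpe⟩

lemma modeFold_char (ps : List (Int × Int)) (h0 : ∀ p ∈ ps, 0 ≤ p.2) :
    ps.foldl mstep (none, 0, false) =
      ((if topM ps = 0 then none else (ps.find? (fun p => p.2 == topM ps)).map (·.1)),
       topM ps,
       (if topM ps = 0 then !ps.isEmpty else decide (2 ≤ ps.countP (fun p => p.2 == topM ps)))) := by
  induction ps using List.reverseRecOn with
  | nil => simp [topM]
  | append_singleton ps q ih =>
    have h0' : ∀ p ∈ ps, 0 ≤ p.2 := fun p hp => h0 p (by simp [hp])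
    have hq : 0 ≤ q.2 := h0 q (by simp)
    have hM := topM_nonneg ps
    have hle := le_topM ps
    rw [List.foldl_append, ih h0', topM_append]
    rw [List.find?_append, List.countP_append]
    simp only [List.foldl_cons, List.foldl_nil]
    rcases lt_trichotomy q.2 (topM ps) with hlt | heq | hgt
    · -- q strictly below the running max: state unchanged
      have hpos : topM ps ≠ 0 := by omega
      have hmax : max (topM ps) q.2 = topM ps := by omega
      rw [hmax]
      have hfq : List.find? (fun p => p.2 == topM ps) [q] = none := by
        simp; omega
      have hcq : List.countP (fun p => p.2 == topM ps) [q] = 0 := by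
        simp [List.countP_cons]; omega
      simp only [hfq, hcq, Option.or_none, Nat.add_zero, mstep, if_neg hpos]
      have : ¬ q.2 > topM ps := by omega
      simp [this, hlt.ne]
    · by_cases h0M : topM ps = 0
      · have hq0 : q.2 = 0 := by omega
        have hmax : max (topM ps) q.2 = 0 := by omega
        rw [hmax]
        simp [mstep, h0M, hq0]
      · have hmax : max (topM ps) q.2 = topM ps := by omega
        rw [hmax]
        obtain ⟨p, hpmem, hpeq⟩ := topM_mem ps h0M
        have hfs : (List.find? (fun p => p.2 == topM ps) ps).isSome := by
          rw [List.find?_isSome]; exact ⟨p, hpmem, by simp [hpeq]⟩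
        obtain ⟨r, hr⟩ := Option.isSome_iff_exists.mp hfs
        have hcpos : 1 ≤ List.countP (fun p => p.2 == topM ps) ps := by
          rw [Nat.one_le_iff_ne_zero, Ne, List.countP_eq_zero]
          push Not; exact ⟨p, hpmem, by simp [hpeq]⟩
        have hcq : List.countP (fun p => p.2 == topM ps) [q] = 1 := by
          simp [heq]
        simp only [hr, hcq, mstep, if_neg h0M]
        rw [if_neg (by omega : ¬ q.2 > topM ps), if_pos heq]
        refine Prod.ext (by simp) (Prod.ext rfl ?_)
        simp only []
        rw [eq_comm, decide_eq_true_iff]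
        omega
    · -- q is a new strict max
      have hmax : max (topM ps) q.2 = q.2 := by omega
      have hq0 : q.2 ≠ 0 := by omega
      rw [hmax]
      have hfn : List.find? (fun p => p.2 == q.2) ps = none := by
        rw [List.find?_eq_none]
        intro x hx
        have := le_topM ps x hx
        simp; omega
      have hcn : List.countP (fun p => p.2 == q.2) ps = 0 := by
        rw [List.countP_eq_zero]
        intro x hx
        have := le_topM ps x hx
        simp; omega
      have hfq : List.find? (fun p => p.2 == q.2) [q] = some q := by simp
      simp only [hfn, hfq, hcn, Option.none_or, mstep, if_neg hq0]
      rw [if_pos hgt]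
      refine Prod.ext (by simp) (Prod.ext rfl ?_)
      have hcq1 : List.countP (fun p => p.2 == q.2) [q] = 1 := by simp
      simp only [hcq1]
      norm_num

lemma topM_eq_of_perm (ps qs : List (Int × Int)) (h : ps.Perm qs) : topM ps = topM qs := by
  have h1 := le_topM ps; have h2 := le_topM qs
  have m1 := topM_nonneg ps; have m2 := topM_nonneg qs
  rcases eq_or_ne (topM ps) 0 with e1 | e1 <;> rcases eq_or_ne (topM qs) 0 with e2 | e2
  · omega
  · obtain ⟨p, hp, he⟩ := topM_mem qs e2
    have := h1 p (h.mem_iff.mpr hp); omega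
  · obtain ⟨p, hp, he⟩ := topM_mem ps e1
    have := h2 p (h.mem_iff.mp hp); omega
  · obtain ⟨p, hp, he⟩ := topM_mem ps e1
    obtain ⟨q, hq, he'⟩ := topM_mem qs e2
    have := h2 p (h.mem_iff.mp hp)
    have := h1 q (h.mem_iff.mpr hq)
    omega

def topOf (ps : List (Int × Int)) : Option Int :=
  if ps.countP (fun p => p.2 == topM ps) = 1 then
    (ps.find? (fun p => p.2 == topM ps)).map (·.1)
  else none

lemma find?_of_filter_eq_singleton {l : List (Int × Int)} {p : (Int × Int) → Bool} {x : Int × Int}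
    (h : l.filter p = [x]) : l.find? p = some x := by
  induction l with
  | nil => simp at h
  | cons a t ih =>
    by_cases hp : p a
    · simp [hp] at h ⊢
      exact h.1
    · simp [hp] at h ⊢
      exact ih h

lemma filter_eq_singleton_of_countP_one {l : List (Int × Int)} {p : (Int × Int) → Bool}
    (h : l.countP p = 1) : ∃ x, l.filter p = [x] := by
  rw [List.countP_eq_length_filter] at h
  exact List.length_eq_one_iff.mp h

lemma topOf_perm (ps qs : List (Int × Int)) (h : ps.Perm qs) : topOf ps = topOf qs := by
  have hM := topM_eq_of_perm ps qs h
  unfold topOf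
  rw [hM, h.countP_eq]
  by_cases hc : qs.countP (fun p => p.2 == topM qs) = 1
  · rw [if_pos hc, if_pos hc]
    obtain ⟨x, hx⟩ := filter_eq_singleton_of_countP_one (l := ps) (p := fun p => p.2 == topM qs)
      (by rw [h.countP_eq]; exact hc)
    obtain ⟨y, hy⟩ := filter_eq_singleton_of_countP_one hc
    have hxy : x = y := by
      have := (h.filter (fun p => p.2 == topM qs))
      rw [hx, hy] at this
      simpa using List.perm_singleton.mp this
    rw [find?_of_filter_eq_singleton hx, find?_of_filter_eq_singleton hy, hxy]
  · rw [if_neg hc, if_neg hc]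

lemma topM_pos (ps : List (Int × Int)) (hpos : ∃ p ∈ ps, 0 < p.2) : 0 < topM ps := by
  obtain ⟨p, hp, hp2⟩ := hpos
  have := le_topM ps p hp
  omega

lemma countP_top_pos (ps : List (Int × Int)) (hM : topM ps ≠ 0) :
    1 ≤ ps.countP (fun p => p.2 == topM ps) := by
  obtain ⟨p, hp, he⟩ := topM_mem ps hM
  rw [Nat.one_le_iff_ne_zero, Ne, List.countP_eq_zero]
  push Not
  exact ⟨p, hp, by simp [he]⟩

lemma ub_body_eq_topOf (ps : List (Int × Int)) (h0 : ∀ p ∈ ps, 0 ≤ p.2)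
    (hpos : ∃ p ∈ ps, 0 < p.2) :
    (if (ps.foldl mstep (none, 0, false)).2.2 then none
     else (ps.foldl mstep (none, 0, false)).1) = topOf ps := by
  have hM : topM ps ≠ 0 := by have := topM_pos ps hpos; omega
  have hc1 := countP_top_pos ps hM
  rw [modeFold_char ps h0]
  unfold topOf
  simp only [if_neg hM]
  by_cases hc : ps.countP (fun p => p.2 == topM ps) = 1
  · rw [if_pos hc]
    have : ¬ (2 ≤ ps.countP (fun p => p.2 == topM ps)) := by omega
    simp [this]
  · rw [if_neg hc]
    have : (2 ≤ ps.countP (fun p => p.2 == topM ps)) := by omega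
    simp [this]

lemma gl_body_eq_topOf (ps : List (Int × Int)) (hne : ps ≠ []) (h1 : ∀ p ∈ ps, 1 ≤ p.2) :
    (let counterList := (PySem.List.sorted ps (fun p => p.2) true).take 2
     if counterList.length < 2 then
       match counterList with
       | [] => none
       | p :: _ => some p.1
     else
       match counterList with
       | p :: q :: _ => if p.2 = q.2 then none else some p.1
       | _ => none) = topOf ps := by
  have hperm : (PySem.List.sorted ps (fun p => p.2) true).Perm ps := PySem.List.sorted_perm ps _ _
  rcases hs : PySem.List.sorted ps (fun p => p.2) true with _ | ⟨p, _ | ⟨q, t⟩⟩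
  · rw [hs] at hperm
    exact absurd (hperm.symm.eq_nil ▸ rfl : ps = []) hne
  · rw [hs] at hperm
    have hps : ps = [p] := List.perm_singleton.mp hperm.symm
    subst hps
    have hp1 := h1 p (by simp)
    have hM : topM [p] = p.2 := by simp [topM]; omega
    simp [topOf, hM]
  · rw [hs] at hperm
    have hpmem : p ∈ ps := hperm.mem_iff.mp (by simp)
    have hmax : ∀ y ∈ ps, y.2 ≤ p.2 := by
      intro y hy
      exact PySem.List.key_head_sorted_rev_ge ps (fun r => r.2) hs y hy
    have hM : topM ps = p.2 := by
      have h1' := le_topM ps p hpmem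
      have hMne : topM ps ≠ 0 := by have := h1 p hpmem; omega
      obtain ⟨r, hr, hre⟩ := topM_mem ps hMne
      have := hmax r hr
      omega
    have hpw : (PySem.List.sorted ps (fun p => p.2) true).Pairwise (fun a b => b.2 ≤ a.2) :=
      PySem.List.sorted_pairwise_rev ps _
    rw [hs] at hpw
    have hqp : q.2 ≤ p.2 := (List.pairwise_cons.mp hpw).1 q (by simp)
    have ht : ∀ r ∈ t, r.2 ≤ q.2 :=
      (List.pairwise_cons.mp (List.pairwise_cons.mp hpw).2).1
    have hcount : ps.countP (fun r => r.2 == topM ps) =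
        (p :: q :: t).countP (fun r => r.2 == topM ps) := (hperm.countP_eq _).symm
    simp only [List.take, List.length_cons]
    rw [if_neg (by simp : ¬ (([] : List (Int × Int)).length + 1 + 1 < 2))]
    by_cases heq : p.2 = q.2
    · rw [if_pos heq]
      have hc2 : 2 ≤ ps.countP (fun r => r.2 == topM ps) := by
        rw [hcount]
        simp [hM, heq]
      unfold topOf
      rw [if_neg (by omega)]
    · rw [if_neg heq]
      have hq2 : q.2 < p.2 := by omega
      have hfs : ps.filter (fun r => r.2 == topM ps) = [p] := by
        have : (p :: q :: t).filter (fun r => r.2 == topM ps) = [p] := by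
          rw [hM]
          have hqf : (q.2 == p.2) = false := by simp; omega
          have htf : t.filter (fun r => r.2 == p.2) = [] :=
            List.filter_eq_nil_iff.mpr (by intro r hr; have := ht r hr; simp; omega)
          simp [hqf, htf]
        have hpf := hperm.filter (fun r => r.2 == topM ps)
        rw [this] at hpf
        exact List.perm_singleton.mp hpf.symm
      unfold topOf
      have hc1 : ps.countP (fun r => r.2 == topM ps) = 1 := by
        rw [List.countP_eq_length_filter, hfs]; rfl
      rw [if_pos hc1, find?_of_filter_eq_singleton hfs]
      rfl

-- canonical items list of a counter and the canonical leader
def cfn (r : List Int) : Int → Int × Int := fun k => (k, (r.count k : Int))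

def citems (r : List Int) : List (Int × Int) := (PySem.Set.ofList r).map (cfn r)

def Lcanon (r : List Int) : Option Int := topOf (citems r)

lemma citems_nonneg (r : List Int) : ∀ p ∈ citems r, 0 ≤ p.2 := by
  intro p hp
  obtain ⟨k, _, rfl⟩ := List.mem_map.mp hp
  simp [cfn]

lemma citems_pos (r : List Int) : ∀ p ∈ citems r, 1 ≤ p.2 := by
  intro p hp
  obtain ⟨k, hk, rfl⟩ := List.mem_map.mp hp
  have : k ∈ r := (PySem.Set.mem_ofList r k).mp hk
  have := List.count_pos_iff.mpr this
  simp [cfn]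
  omega

lemma citems_ne_nil (r : List Int) (h : r ≠ []) : citems r ≠ [] := by
  rcases r with _ | ⟨x, t⟩
  · exact absurd rfl h
  · intro hc
    have : x ∈ PySem.Set.ofList (x :: t) := (PySem.Set.mem_ofList _ x).mpr (by simp)
    unfold citems at hc
    rw [List.map_eq_nil_iff] at hc
    rw [hc] at this
    simp at this

-- dropping non-positive entries does not change topOf (when something positive is present)
lemma topOf_filter_pos (ps : List (Int × Int)) (_h0 : ∀ p ∈ ps, 0 ≤ p.2)
    (hpos : ∃ p ∈ ps, 0 < p.2) :
    topOf ps = topOf (ps.filter (fun p => decide (0 < p.2))) := by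
  have hMpos : 0 < topM ps := topM_pos ps hpos
  have hM : topM (ps.filter (fun p => decide (0 < p.2))) = topM ps := by
    obtain ⟨p, hp, hp2⟩ := topM_mem ps (by omega)
    have hpf : p ∈ ps.filter (fun p => decide (0 < p.2)) :=
      List.mem_filter.mpr ⟨hp, by simp; omega⟩
    have h1 := le_topM _ p hpf
    have h2 : ∀ q ∈ ps.filter (fun p => decide (0 < p.2)), q.2 ≤ topM ps := by
      intro q hq
      exact le_topM ps q (List.mem_filter.mp hq).1
    have h3 := topM_nonneg (ps.filter (fun p => decide (0 < p.2)))
    rcases eq_or_ne (topM (ps.filter (fun p => decide (0 < p.2)))) 0 with e | e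
    · omega
    · obtain ⟨q, hq, he⟩ := topM_mem _ e
      have := h2 q hq
      omega
  have hfilter : (ps.filter (fun p => decide (0 < p.2))).filter (fun p => p.2 == topM ps)
      = ps.filter (fun p => p.2 == topM ps) := by
    rw [List.filter_filter]
    apply List.filter_congr
    intro p hp
    rcases eq_or_ne p.2 (topM ps) with e | e
    · simp [e]; omega
    · simp [e]
  unfold topOf
  rw [hM]
  have hcnt : (ps.filter (fun p => decide (0 < p.2))).countP (fun p => p.2 == topM ps)
      = ps.countP (fun p => p.2 == topM ps) := by
    rw [List.countP_eq_length_filter, List.countP_eq_length_filter, hfilter]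
  rw [hcnt]
  by_cases hc : ps.countP (fun p => p.2 == topM ps) = 1
  · rw [if_pos hc, if_pos hc]
    obtain ⟨x, hx⟩ := filter_eq_singleton_of_countP_one hc
    have hx2 : (ps.filter (fun p => decide (0 < p.2))).filter (fun p => p.2 == topM ps) = [x] := by
      rw [hfilter]; exact hx
    rw [find?_of_filter_eq_singleton hx, find?_of_filter_eq_singleton hx2]
  · rw [if_neg hc, if_neg hc]

lemma items_counter_citems (l : List Int) : (PySem.Dict.counter l).items = citems l := by
  rw [PySem.Dict.items_counter]
  rfl

lemma gl_counter (l : List Int) (h : l ≠ []) :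
    getLeaderA (PySem.Dict.counter l) = Lcanon l := by
  unfold getLeaderA
  rw [items_counter_citems]
  exact gl_body_eq_topOf (citems l) (citems_ne_nil l h) (citems_pos l)

lemma ub_dict (d : PySem.Dict Int Int) (h0 : ∀ p ∈ d.items, 0 ≤ p.2)
    (hpos : ∃ p ∈ d.items, 0 < p.2) : uniqueModeB d = topOf d.items := by
  unfold uniqueModeB
  exact ub_body_eq_topOf d.items h0 hpos

lemma ub_counter (l : List Int) (h : l ≠ []) :
    uniqueModeB (PySem.Dict.counter l) = Lcanon l := by
  rw [ub_dict _ (by rw [items_counter_citems]; exact citems_nonneg l)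
        (by rw [items_counter_citems]
            rcases List.exists_mem_of_ne_nil (citems l) (citems_ne_nil l h) with ⟨p, hp⟩
            exact ⟨p, hp, by have := citems_pos l p hp; omega⟩),
      items_counter_citems]
  rfl

def Rd (K : List Int) (t : List Int) : PySem.Dict Int Int := ⟨K.map (cfn t)⟩

lemma ub_Rd (K t : List Int) (hK : K.Nodup) (ht : t ≠ []) (hsub : ∀ x ∈ t, x ∈ K) :
    uniqueModeB (Rd K t) = Lcanon t := by
  have hitems : (Rd K t).items = K.map (cfn t) := rfl
  rcases t with _ | ⟨y, t'⟩
  · exact absurd rfl ht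
  have hy : (y, ((y :: t').count y : Int)) ∈ K.map (cfn (y :: t')) :=
    List.mem_map.mpr ⟨y, hsub y (by simp), rfl⟩
  rw [ub_dict _ ?h0 ?hpos, hitems]
  case h0 =>
    intro p hp
    rw [hitems] at hp
    obtain ⟨k, _, rfl⟩ := List.mem_map.mp hp
    simp [cfn]
  case hpos =>
    refine ⟨_, by rw [hitems]; exact hy, ?_⟩
    have : 0 < (y :: t').count y := List.count_pos_iff.mpr (by simp)
    simp
  -- now: topOf (K.map (cfn t)) = Lcanon t
  rw [topOf_filter_pos _ (by intro p hp; obtain ⟨k, _, rfl⟩ := List.mem_map.mp hp; simp [cfn])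
        ⟨_, hy, by have : 0 < (y :: t').count y := List.count_pos_iff.mpr (by simp); simp⟩]
  have hfm : (K.map (cfn (y :: t'))).filter (fun p => decide (0 < p.2))
      = (K.filter (fun k => decide (0 < ((y :: t').count k : Int)))).map (cfn (y :: t')) := by
    rw [List.filter_map]
    rfl
  rw [hfm]
  apply topOf_perm
  apply List.Perm.map
  rw [List.perm_ext_iff_of_nodup (hK.filter _) (PySem.Set.nodup_ofList _)]
  intro k
  rw [List.mem_filter, PySem.Set.mem_ofList]
  constructor
  · intro ⟨_, hpos⟩
    simpa using hpos
  · intro hk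
    exact ⟨hsub k hk, by simpa using List.count_pos_iff.mpr hk⟩

lemma ins_step (l : List Int) (x : Int) :
    (PySem.Dict.counter l).insert x ((PySem.Dict.counter l).getD x 0 + 1)
      = PySem.Dict.counter (l ++ [x]) := by
  have h1 := PySem.Dict.foldl_insert_getD_add_one_eq_counter (l ++ [x])
  rw [List.foldl_append, PySem.Dict.foldl_insert_getD_add_one_eq_counter l,
      List.foldl_cons, List.foldl_nil] at h1
  exact h1

lemma counter_eq_Rd (a : List Int) :
    PySem.Dict.counter a = Rd (PySem.Set.ofList a) a := by
  apply PySem.Dict.ext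
  rw [items_counter_citems]
  rfl

lemma Rd_keys (K t : List Int) : (Rd K t).keys = K := by
  show (K.map (cfn t)).map (·.1) = K
  rw [List.map_map, show ((fun (p : Int × Int) => p.1) ∘ cfn t) = id from rfl, List.map_id]

lemma rd_step (K : List Int) (hK : K.Nodup) (x : Int) (t : List Int) (hx : x ∈ K) :
    (Rd K (x :: t)).insert x ((Rd K (x :: t)).getD x 0 - 1) = Rd K t := by
  have hnd : (Rd K (x :: t)).keys.Nodup := by rw [Rd_keys]; exact hK
  have hmem : (x, ((x :: t).count x : Int)) ∈ (Rd K (x :: t)).items :=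
    List.mem_map.mpr ⟨x, hx, rfl⟩
  have hgetD : (Rd K (x :: t)).getD x 0 = ((x :: t).count x : Int) :=
    PySem.Dict.getD_of_mem_items _ hmem hnd 0
  have hcont : (Rd K (x :: t)).contains x = true :=
    (PySem.Dict.contains_iff_mem_keys _ x).mpr (by rw [Rd_keys]; exact hx)
  apply PySem.Dict.ext
  rw [PySem.Dict.items_insert_of_contains _ _ hcont, hgetD]
  show (K.map (cfn (x :: t))).map
      (fun p => if (p.1 == x) = true then (x, ((x :: t).count x : Int) - 1) else p)
    = K.map (cfn t)
  rw [List.map_map]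
  apply List.map_congr_left
  intro k hk
  by_cases he : k = x
  · subst he
    simp only [Function.comp, cfn, beq_self_eq_true, if_pos]
    have : (k :: t).count k = t.count k + 1 := List.count_cons_self
    rw [this]
    simp
  · have : (k == x) = false := by simp [he]
    simp only [Function.comp, cfn, this, Bool.false_eq_true, if_false]
    have hxk : ¬ x = k := fun hcontra => he hcontra.symm
    have : (x :: t).count k = t.count k := by
      rw [List.count_cons]
      simp [hxk]
    rw [this]

def stepB (st : PySem.Dict Int Int × PySem.Dict Int Int × Int) (x : Int) :
    PySem.Dict Int Int × PySem.Dict Int Int × Int :=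
  let left := st.1.insert x (st.1.getD x 0 + 1)
  let right := st.2.1.insert x (st.2.1.getD x 0 - 1)
  let count := if uniqueModeB left = uniqueModeB right then st.2.2 + 1 else st.2.2
  (left, right, count)

def cnt (p u t : List Int) (c : Int) : Int :=
  match u with
  | [] => c
  | x :: u' => cnt (p ++ [x]) u' t (if Lcanon (p ++ [x]) = Lcanon (u' ++ t) then c + 1 else c)

lemma loopB (K : List Int) (hK : K.Nodup) (t : List Int) (ht : t ≠ []) :
    ∀ (u p : List Int) (c : Int), (∀ y ∈ u ++ t, y ∈ K) →
    u.foldl stepB (PySem.Dict.counter p, Rd K (u ++ t), c)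
      = (PySem.Dict.counter (p ++ u), Rd K t, cnt p u t c) := by
  intro u
  induction u with
  | nil => intro p c _; simp [cnt]
  | cons x u' ih =>
    intro p c hmem
    rw [List.cons_append, List.foldl_cons]
    have hx : x ∈ K := hmem x (by simp)
    have hstep : stepB (PySem.Dict.counter p, Rd K (x :: (u' ++ t)), c) x
        = (PySem.Dict.counter (p ++ [x]), Rd K (u' ++ t),
           if Lcanon (p ++ [x]) = Lcanon (u' ++ t) then c + 1 else c) := by
      unfold stepB
      simp only []
      rw [ins_step, rd_step K hK x (u' ++ t) hx]
      rw [ub_counter (p ++ [x]) (by simp), ub_Rd K (u' ++ t) hK (by simp [ht])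
            (fun y hy => hmem y (by simp at hy ⊢; tauto))]
    rw [hstep, ih (p ++ [x]) _ (fun y hy => hmem y (by simp at hy ⊢; tauto))]
    rw [show (p ++ [x]) ++ u' = p ++ (x :: u') by simp]
    rfl

def bodyL (a : List Int) (c : Int) (i : Int) : Int :=
  if Lcanon (PySem.List.slice a none (some i)) = Lcanon (PySem.List.slice a (some i) none)
  then c + 1 else c

lemma rangeA (a : List Int) : ∀ (u p t : List Int) (c : Int), a = p ++ u ++ t →
    (PySem.List.pyRange ((p.length : Int) + 1) ((p.length : Int) + (u.length : Int) + 1) 1).foldl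
      (bodyL a) c = cnt p u t c := by
  intro u
  induction u with
  | nil =>
    intro p t c _
    rw [PySem.List.pyRange_one_eq_nil (by simp)]
    rfl
  | cons x u' ih =>
    intro p t c ha
    rw [PySem.List.pyRange_one_cons
          (by have : ((x :: u').length : Int) = (u'.length : Int) + 1 := by simp
              omega),
        List.foldl_cons]
    have hsl : PySem.List.slice a none (some ((p.length : Int) + 1)) = p ++ [x] := by
      rw [PySem.List.slice_to a (by omega)]
      have h1 : ((p.length : Int) + 1).toNat = (p ++ [x]).length := by simp
      rw [h1, ha, show p ++ (x :: u') ++ t = (p ++ [x]) ++ (u' ++ t) by simp,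
          List.take_left' rfl]
    have hsr : PySem.List.slice a (some ((p.length : Int) + 1)) none = u' ++ t := by
      rw [PySem.List.slice_from a (by omega)]
      have h1 : ((p.length : Int) + 1).toNat = (p ++ [x]).length := by simp
      rw [h1, ha, show p ++ (x :: u') ++ t = (p ++ [x]) ++ (u' ++ t) by simp,
          List.drop_left' rfl]
    have hbody : bodyL a c ((p.length : Int) + 1)
        = (if Lcanon (p ++ [x]) = Lcanon (u' ++ t) then c + 1 else c) := by
      unfold bodyL
      rw [hsl, hsr]
    rw [hbody]
    have harg1 : (p.length : Int) + 1 + 1 = (((p ++ [x]).length : Int)) + 1 := by simp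
    have harg2 : (p.length : Int) + ((x :: u').length : Int) + 1
        = (((p ++ [x]).length : Int)) + ((u'.length : Int)) + 1 := by simp; ring
    rw [harg1, harg2,
        ih (p ++ [x]) t _ (by rw [ha]; simp)]
    rfl

theorem main_eq (a : List Int) : solution a = solution_alt a := by
  by_cases hnil : a = []
  · subst hnil; rfl
  · have hlen : 1 ≤ a.length := by
      rcases a with _ | _
      · exact absurd rfl hnil
      · simp
    have hA : solution a = (PySem.List.pyRange 1 (a.length : Int) 1).foldl (bodyL a) 0 := by
      unfold solution
      apply PySem.List.foldl_congr_mem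
      intro acc i hi
      rw [PySem.List.mem_pyRange_one] at hi
      have hsl : PySem.List.slice a none (some i) = a.take i.toNat :=
        PySem.List.slice_to a (by omega)
      have hsr : PySem.List.slice a (some i) none = a.drop i.toNat :=
        PySem.List.slice_from a (by omega)
      have hne1 : a.take i.toNat ≠ [] := by
        rw [Ne, List.take_eq_nil_iff]
        push Not
        exact ⟨by omega, hnil⟩
      have hne2 : a.drop i.toNat ≠ [] := by
        rw [Ne, List.drop_eq_nil_iff]
        omega
      show (if getLeaderA (PySem.Dict.counter (PySem.List.slice a none (some i)))
              = getLeaderA (PySem.Dict.counter (PySem.List.slice a (some i) none))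
            then acc + 1 else acc) = bodyL a acc i
      unfold bodyL
      rw [hsl, hsr, gl_counter _ hne1, gl_counter _ hne2]
    set u := a.dropLast with hu
    set t := [a.getLast hnil] with htdef
    have key : a = u ++ t := (List.dropLast_append_getLast hnil).symm
    have hulen : u.length = a.length - 1 := by rw [hu]; exact List.length_dropLast
    have hrange : PySem.List.pyRange 1 (a.length : Int) 1
        = PySem.List.pyRange ((([] : List Int).length : Int) + 1)
            ((([] : List Int).length : Int) + (u.length : Int) + 1) 1 := by
      have : (a.length : Int) = (u.length : Int) + 1 := by
        rw [hulen]; omega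
      rw [this]
      norm_num
    rw [hA, hrange, rangeA a u [] t 0 (by simpa using key)]
    -- B side
    have halt : solution_alt a
        = ((a.dropLast).foldl stepB
            (PySem.Dict.empty, a.foldl (fun d x => d.insert x (d.getD x 0 + 1)) PySem.Dict.empty, 0)).2.2 := by
      unfold solution_alt
      rw [PySem.List.slice_to_neg_one]
      rfl
    rw [halt, PySem.Dict.foldl_insert_getD_add_one_eq_counter a, counter_eq_Rd a]
    set K := PySem.Set.ofList a with hKdef
    have hRd : Rd K a = Rd K (u ++ t) := by rw [← key]
    have hempty : (PySem.Dict.empty : PySem.Dict Int Int) = PySem.Dict.counter [] := rfl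
    rw [← hu, hRd, hempty,
        loopB K (by rw [hKdef]; exact PySem.Set.nodup_ofList a) t (by rw [htdef]; simp) u [] 0
          (by intro y hy
              rw [hKdef, PySem.Set.mem_ofList]
              rw [key]
              exact hy)]

-- ===== VERDICT (by name: the statement is the Claim_ definition above) =====
theorem solution_spec : Claim_equal_solution := by
  intro a _
  unfold Spec_solution
  exact main_eq a
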